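-- pv_equiv track=rewrite | github.com/TeeChenxing/CS-4100-Code | Programming_Assignments/Assignment_1/hw1.py | create_default_action_list
-- ===== SOURCE A (Python) =====
-- def create_default_action_list(movements, grid_size):
--     placements = ["place"] * (grid_size ** 2)
--     colors = ["switchcolor"] * (grid_size ** 2)
--
--     action = []
--     index = 0
--
--     for i in range(len(placements)):
--         temp = []
--         temp.append(placements[i])
--         if index < len(movements):
--             temp.append(movements[index])
--             temp.append(colors[index])
--             index += 1
--
--         action.append(temp)
--
--     return action
-- ===== SOURCE B (Python) =====
-- def create_default_action_list(movements, grid_size):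
--     n = grid_size ** 2
--     k = min(n, len(movements))
--     active = [["place", mv, "switchcolor"] for mv in movements[:k]]
--     padding = [["place"] for _ in range(n - k)]
--     return active + padding
-- ===== Notes on version B (the rewrite author's own statement) =====
-- stated objective: simpler
-- what changed: Replaces the branching index-tracking loop over scratch placements/colors arrays with two direct blocks: a comprehension over the first min(n, len(movements)) movements plus (n-k) fresh ['place'] pads, concatenated.
import Mathlib
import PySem

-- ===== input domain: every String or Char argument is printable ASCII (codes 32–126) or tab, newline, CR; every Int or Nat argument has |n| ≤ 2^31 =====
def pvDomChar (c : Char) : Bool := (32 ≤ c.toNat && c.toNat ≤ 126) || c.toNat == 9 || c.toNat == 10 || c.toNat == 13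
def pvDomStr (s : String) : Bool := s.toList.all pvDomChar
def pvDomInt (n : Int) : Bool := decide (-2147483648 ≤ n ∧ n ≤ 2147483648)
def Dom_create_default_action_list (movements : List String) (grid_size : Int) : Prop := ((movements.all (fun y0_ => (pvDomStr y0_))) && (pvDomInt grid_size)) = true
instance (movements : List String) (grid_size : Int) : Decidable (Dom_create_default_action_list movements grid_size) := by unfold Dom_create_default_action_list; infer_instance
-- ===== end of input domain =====

-- B replaces A's branching index-tracking loop (with scratch placements/colors arrays)
-- by a comprehension over the first min(n, len(movements)) movements plus fresh padding; objective: simpler.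

-- ===== PORT A =====
def create_default_action_list (movements : List String) (grid_size : Int) : List (List String) :=
  let placements : List String := List.replicate (grid_size ^ 2).toNat "place"
  let colors : List String := List.replicate (grid_size ^ 2).toNat "switchcolor"
  let st := (List.range placements.length).foldl
    (fun (st : List (List String) × Nat) i =>
      let temp := [placements.getD i ""]
      if st.2 < movements.length then
        (st.1 ++ [temp ++ [movements.getD st.2 "", colors.getD st.2 ""]], st.2 + 1)
      else
        (st.1 ++ [temp], st.2))
    ([], 0)
  st.1

-- ===== PORT B =====
def create_default_action_list_alt (movements : List String) (grid_size : Int) : List (List String) :=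
  let n := (grid_size ^ 2).toNat
  let k := min n movements.length
  let active := (movements.take k).map (fun mv => ["place", mv, "switchcolor"])
  let padding := List.replicate (n - k) (["place"] : List String)
  active ++ padding

-- ===== PRECONDITION & SPEC =====
def Spec_create_default_action_list (movements : List String) (grid_size : Int) (out : List (List String)) : Prop := out = create_default_action_list_alt movements grid_size
instance (movements : List String) (grid_size : Int) (out : List (List String)) : Decidable (Spec_create_default_action_list movements grid_size out) := by unfold Spec_create_default_action_list; infer_instance

-- ===== CLAIM (what is proved, stated in full; the proofs are below) =====
def Claim_equal_create_default_action_list : Prop := ∀ (movements : List String) (grid_size : Int), Dom_create_default_action_list movements grid_size → Spec_create_default_action_list movements grid_size (create_default_action_list movements grid_size)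

-- ===== LEMMAS AND PROOFS =====

theorem cdal_getD_replicate {α : Type} (s d : α) {n m : Nat} (h : m < n) :
    (List.replicate n s).getD m d = s := by
  simp [List.getD, List.getElem?_eq_getElem (show m < (List.replicate n s).length by simpa using h)]

theorem cdal_loop (movements : List String) (n m : Nat) (hm : m ≤ n) :
    (List.range m).foldl
      (fun (st : List (List String) × Nat) i =>
        let temp := [(List.replicate n ("place" : String)).getD i ""]
        if st.2 < movements.length then
          (st.1 ++ [temp ++ [movements.getD st.2 "", (List.replicate n ("switchcolor" : String)).getD st.2 ""]], st.2 + 1)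
        else
          (st.1 ++ [temp], st.2))
      ([], 0)
    = ((movements.take (min m movements.length)).map (fun mv => ["place", mv, "switchcolor"])
        ++ List.replicate (m - min m movements.length) (["place"] : List String),
       min m movements.length) := by
  induction m with
  | zero => simp
  | succ m ih =>
    have hm' : m ≤ n := Nat.le_of_succ_le hm
    rw [List.range_succ, List.foldl_append, ih hm']
    simp only [List.foldl_cons, List.foldl_nil]
    by_cases h : m < movements.length
    · have h1 : min m movements.length = m := Nat.min_eq_left (Nat.le_of_lt h)
      have h2 : min (m + 1) movements.length = m + 1 := Nat.min_eq_left h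
      have hmn : m < n := Nat.lt_of_lt_of_le (Nat.lt_succ_self m) hm
      simp only [h1, h2]
      rw [if_pos (by simpa [h1] using h)]
      have htake : movements.take (m + 1) = movements.take m ++ [movements.getD m ""] := by
        rw [List.take_succ]
        simp [List.getElem?_eq_getElem h, List.getD, List.getElem?_eq_getElem h]
      rw [cdal_getD_replicate ("place" : String) "" hmn,
        cdal_getD_replicate ("switchcolor" : String) "" hmn, htake]
      simp
    · have hL : movements.length ≤ m := Nat.le_of_not_lt h
      have h1 : min m movements.length = movements.length := Nat.min_eq_right hL
      have h2 : min (m + 1) movements.length = movements.length := Nat.min_eq_right (Nat.le_succ_of_le hL)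
      have hmn : m < n := Nat.lt_of_lt_of_le (Nat.lt_succ_self m) hm
      simp only [h1, h2]
      rw [if_neg (by simpa [h1] using h)]
      rw [cdal_getD_replicate ("place" : String) "" hmn, Nat.succ_sub hL,
        List.replicate_succ' (n := m - movements.length), ← List.append_assoc]

-- ===== VERDICT (by name: the statement is the Claim_ definition above) =====
theorem create_default_action_list_spec : Claim_equal_create_default_action_list := by
  intro movements grid_size _
  unfold Spec_create_default_action_list create_default_action_list create_default_action_list_alt
  simp only [List.length_replicate]
  rw [cdal_loop movements ((grid_size ^ 2).toNat) ((grid_size ^ 2).toNat) (Nat.le_refl _)]
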